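-- pv_equiv track=rewrite | github.com/svend4/info150 | triage4/triage4/signatures/radar/hexsig.py | delaunay_graph
-- ===== SOURCE A (Python) =====
-- N_DIMS = 6
--
-- N_NODES = 64  # 2 ** N_DIMS
--
-- def hamming(a: int, b: int) -> int:
--     return bin(a ^ b).count("1")
--
-- def neighbors(h: int) -> list[int]:
--     return [h ^ (1 << i) for i in range(N_DIMS)]
--
-- def voronoi_cells(centers: list[int]) -> dict[int, list[int]]:
--     cells: dict[int, list[int]] = {c: [] for c in centers}
--     for h in range(N_NODES):
--         nearest = min(centers, key=lambda c: hamming(h, c))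
--         cells[nearest].append(h)
--     return cells
--
-- def delaunay_graph(centers: list[int]) -> list[tuple[int, int]]:
--     cells = voronoi_cells(centers)
--     edges: set[tuple[int, int]] = set()
--     for c1 in centers:
--         for node in cells[c1]:
--             for nb in neighbors(node):
--                 for c2 in centers:
--                     if c2 != c1 and nb in cells[c2]:
--                         edge = (min(c1, c2), max(c1, c2))
--                         edges.add(edge)
--     return list(edges)
-- ===== SOURCE B (Python) =====
-- N_DIMS = 6
--
-- N_NODES = 64  # 2 ** N_DIMS
--
-- def delaunay_graph(centers: list[int]) -> list[tuple[int, int]]: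
--     # Flat label array: assign[h] = nearest center of node h (min is first-wins, as in A;
--     # raises ValueError on empty centers, as in A).
--     assign = [min(centers, key=lambda c: bin(h ^ c).count("1")) for h in range(N_NODES)]
--     edges: set[tuple[int, int]] = set()
--     for c1 in centers:
--         for h in range(N_NODES):
--             if assign[h] == c1:
--                 for i in range(N_DIMS):
--                     c2 = assign[h ^ (1 << i)]
--                     if c2 != c1:
--                         edges.add((min(c1, c2), max(c1, c2)))
--     return list(edges)
-- ===== Notes on version B (the rewrite author's own statement) =====
-- stated objective: faster
-- what changed: B replaces A's dict-of-cells plus the per-neighbor inner scan over centers with a list-membership test by one flat 64-entry nearest-center label array that is looked up directly for each hypercube neighbor.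
-- outside the precondition, e.g. on delaunay_graph([]): A raises ValueError, B raises ValueError
import Mathlib
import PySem

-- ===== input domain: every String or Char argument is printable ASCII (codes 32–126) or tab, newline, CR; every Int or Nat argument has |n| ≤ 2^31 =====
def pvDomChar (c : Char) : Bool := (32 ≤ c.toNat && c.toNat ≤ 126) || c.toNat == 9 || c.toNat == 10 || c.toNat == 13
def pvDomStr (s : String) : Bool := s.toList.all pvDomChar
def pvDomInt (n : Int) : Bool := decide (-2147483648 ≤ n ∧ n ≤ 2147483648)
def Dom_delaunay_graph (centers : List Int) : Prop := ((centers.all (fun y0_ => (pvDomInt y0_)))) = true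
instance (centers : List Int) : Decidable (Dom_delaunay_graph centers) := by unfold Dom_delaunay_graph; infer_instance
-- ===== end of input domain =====

set_option maxRecDepth 4096
set_option maxHeartbeats 1600000


-- B replaces A's dict-of-cells plus inner centre scan and list-membership test by one flat
-- nearest-centre label array looked up directly; a timing run measured B as faster.

-- ===== PORT A =====
-- bin(a ^ b).count("1"): popcount of |a ^ b|, exact also for negative ints (PySem.Int.bitCount)
def hamming (a b : Int) : Int := (PySem.Int.bitCount (PySem.Int.bxor a b) : Int)

-- min(centers, key=lambda c: hamming(h, c)); total form via getD: Pre_ excludes centers = [],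
-- where Python's min raises ValueError.  Source B contains the identical expression
-- min(centers, key=lambda c: bin(h ^ c).count("1")), so this helper is shared by both ports.
def nearestCenter (centers : List Int) (h : Int) : Int :=
  (PySem.List.min? centers (fun c => hamming h c)).getD 0

-- 1 << i, exact for the nonnegative i of range(N_DIMS) (shared spelling for both ports)
def pyShl1 (i : Int) : Int := (1 : Int) <<< i.toNat

-- [h ^ (1 << i) for i in range(N_DIMS)]
def neighbors (h : Int) : List Int :=
  (PySem.List.pyRange 0 6 1).map (fun i => PySem.Int.bxor h (pyShl1 i))

def voronoi_cells (centers : List Int) : PySem.Dict Int (List Int) :=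
  -- {c: [] for c in centers}
  let cells := centers.foldl (fun d c => d.insert c ([] : List Int)) PySem.Dict.empty
  -- cells[nearest].append(h): nearest is always a key, so Dict.modify is exact here
  (PySem.List.pyRange 0 64 1).foldl
    (fun d h => d.modify (nearestCenter centers h) [] (fun l => l ++ [h])) cells

def delaunay_graph (centers : List Int) : List (Int × Int) :=
  -- cells[c1] / cells[c2] via getD []: every c ∈ centers is a key of cells, so exact
  centers.foldl (fun es c1 =>
    ((voronoi_cells centers).getD c1 []).foldl (fun es node =>
      (neighbors node).foldl (fun es nb =>
        centers.foldl (fun es c2 =>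
          if c2 ≠ c1 ∧ nb ∈ (voronoi_cells centers).getD c2 [] then
            PySem.Set.add es (min c1 c2, max c1 c2)
          else es) es) es) es) (PySem.Set.empty : PySem.Set (Int × Int))

-- ===== PORT B =====
-- [min(centers, key=lambda c: bin(h ^ c).count("1")) for h in range(N_NODES)]
def assignArr (centers : List Int) : List Int :=
  (PySem.List.pyRange 0 64 1).map (fun h => nearestCenter centers h)

def delaunay_graph_alt (centers : List Int) : List (Int × Int) :=
  -- assign[h] / assign[h ^ (1 << i)] via pyGetD 0: indices are always in [0, 64), so exact
  centers.foldl (fun es c1 =>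
    (PySem.List.pyRange 0 64 1).foldl (fun es h =>
      if PySem.List.pyGetD (assignArr centers) h 0 = c1 then
        (PySem.List.pyRange 0 6 1).foldl (fun es i =>
          let c2 := PySem.List.pyGetD (assignArr centers) (PySem.Int.bxor h (pyShl1 i)) 0
          if c2 ≠ c1 then PySem.Set.add es (min c1 c2, max c1 c2) else es) es
      else es) es) (PySem.Set.empty : PySem.Set (Int × Int))

-- ===== PRECONDITION & SPEC =====
-- Pre_ excludes only centers = [], where Python's min([]) raises ValueError in both A and B.
def Pre_delaunay_graph (centers : List Int) : Prop := centers ≠ []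
instance (centers : List Int) : Decidable (Pre_delaunay_graph centers) := by
  unfold Pre_delaunay_graph; infer_instance

def pvWitness_delaunay_graph : List Int := [0, 63]

def Spec_delaunay_graph (centers : List Int) (out : List (Int × Int)) : Prop := out = delaunay_graph_alt centers
instance (centers : List Int) (out : List (Int × Int)) : Decidable (Spec_delaunay_graph centers out) := by unfold Spec_delaunay_graph; infer_instance

-- ===== CLAIM (what is proved, stated in full; the proofs are below) =====
def Claim_equal_delaunay_graph : Prop := ∀ (centers : List Int), Dom_delaunay_graph centers → Pre_delaunay_graph centers → Spec_delaunay_graph centers (delaunay_graph centers)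

-- ===== LEMMAS AND PROOFS =====

theorem nearestCenter_mem (centers : List Int) (h : Int) (hne : centers ≠ []) :
    nearestCenter centers h ∈ centers := by
  unfold nearestCenter
  cases e : PySem.List.min? centers (fun c => hamming h c) with
  | none => exact absurd ((PySem.List.min?_eq_none_iff _ _).mp e) hne
  | some m => simpa using PySem.List.min?_mem e

theorem getD_foldl_insert_nil (l : List Int) (d : PySem.Dict Int (List Int))
    (hd : ∀ c, d.getD c ([] : List Int) = []) :
    ∀ c, (l.foldl (fun d c => d.insert c ([] : List Int)) d).getD c [] = [] := by
  induction l generalizing d with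
  | nil => exact hd
  | cons x xs ih =>
      intro c
      refine ih _ (fun c' => ?_) c
      rw [PySem.Dict.getD_insert]
      split <;> simp [hd]

theorem cells_char (centers : List Int) (c : Int) :
    (voronoi_cells centers).getD c [] =
      (PySem.List.pyRange 0 64 1).filter (fun h => nearestCenter centers h == c) := by
  unfold voronoi_cells
  have hmap :
      (PySem.List.pyRange 0 64 1).foldl
        (fun d h => d.modify (nearestCenter centers h) [] (fun l => l ++ [h]))
        (centers.foldl (fun d c => d.insert c ([] : List Int)) PySem.Dict.empty)
      = ((PySem.List.pyRange 0 64 1).map (fun h => (nearestCenter centers h, h))).foldl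
          (fun d p => d.modify p.1 [] (fun l => l ++ [p.2]))
          (centers.foldl (fun d c => d.insert c ([] : List Int)) PySem.Dict.empty) := by
    rw [List.foldl_map]
  rw [hmap, PySem.Dict.getD_foldl_modify_append,
      getD_foldl_insert_nil centers _ (fun c' => by simp [PySem.Dict.getD_empty]) c,
      List.filter_map, List.map_map]
  simp [Function.comp_def]

theorem mem_cells_iff (centers : List Int) (c nb : Int) (h0 : 0 ≤ nb) (h64 : nb < 64) :
    nb ∈ (voronoi_cells centers).getD c [] ↔ nearestCenter centers nb = c := by
  rw [cells_char]
  simp [List.mem_filter, PySem.List.mem_pyRange_one, h0, h64]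

theorem add_add_self (s : PySem.Set (Int × Int)) (p : Int × Int) :
    PySem.Set.add (PySem.Set.add s p) p = PySem.Set.add s p :=
  PySem.Set.add_of_mem ((PySem.Set.mem_add s p p).mpr (Or.inr rfl))

theorem collapse_absent (l : List Int) (c1 v : Int) :
    ∀ es : PySem.Set (Int × Int), (v ∉ l ∨ v = c1) →
    l.foldl (fun es c2 => if c2 ≠ c1 ∧ v = c2 then PySem.Set.add es (min c1 c2, max c1 c2) else es) es
      = es := by
  induction l with
  | nil => intro es _; rfl
  | cons x xs ih =>
      intro es hv
      have hx : ¬ (x ≠ c1 ∧ v = x) := by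
        rcases hv with hv | hv
        · rintro ⟨-, rfl⟩; exact hv List.mem_cons_self
        · rintro ⟨hne, rfl⟩; exact hne hv
      simp only [List.foldl_cons, if_neg hx]
      refine ih es ?_
      rcases hv with hv | hv
      · exact Or.inl (fun hm => hv (List.mem_cons_of_mem _ hm))
      · exact Or.inr hv

theorem collapse (l : List Int) (c1 v : Int) (es : PySem.Set (Int × Int)) (hv : v ∈ l) :
    l.foldl (fun es c2 => if c2 ≠ c1 ∧ v = c2 then PySem.Set.add es (min c1 c2, max c1 c2) else es) es
      = if v ≠ c1 then PySem.Set.add es (min c1 v, max c1 v) else es := by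
  by_cases hvc : v = c1
  · rw [collapse_absent l c1 v es (Or.inr hvc), if_neg (by simpa using hvc)]
  · have aux : ∀ (l : List Int) (es : PySem.Set (Int × Int)), v ∈ l →
        l.foldl (fun es c2 => if c2 ≠ c1 ∧ v = c2 then PySem.Set.add es (min c1 c2, max c1 c2) else es) es
          = PySem.Set.add es (min c1 v, max c1 v) := by
      intro l
      induction l with
      | nil => intro es hm; cases hm
      | cons x xs ih =>
          intro es hm
          by_cases hx : v = x
          · subst hx
            simp only [List.foldl_cons]
            rw [if_pos (show v ≠ c1 ∧ True from ⟨hvc, trivial⟩)]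
            by_cases hmx : v ∈ xs
            · rw [ih _ hmx, add_add_self]
            · exact collapse_absent xs c1 v _ (Or.inl hmx)
          · have hmx : v ∈ xs := by
              rcases List.mem_cons.mp hm with h | h
              · exact absurd h hx
              · exact h
            simp only [List.foldl_cons]
            rw [if_neg (by rintro ⟨-, h⟩; exact hx h), ih _ hmx]
    rw [aux l es hv, if_pos hvc]

theorem xor_bound (h i : Int) (h0 : 0 ≤ h) (h64 : h < 64) (i0 : 0 ≤ i) (i6 : i < 6) :
    0 ≤ PySem.Int.bxor h (pyShl1 i) ∧ PySem.Int.bxor h (pyShl1 i) < 64 := by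
  obtain ⟨m, rfl⟩ : ∃ m : Nat, h = (m : Int) := ⟨h.toNat, (Int.toNat_of_nonneg h0).symm⟩
  have hk : i.toNat < 6 := by omega
  have hshift : pyShl1 i = ((2 ^ i.toNat : Nat) : Int) := by
    unfold pyShl1
    set k := i.toNat with hkk
    interval_cases k <;> decide
  rw [hshift, PySem.Int.bxor_natCast]
  have hm : m < 2 ^ 6 := by exact_mod_cast h64
  have hp : (2 ^ i.toNat : Nat) < 2 ^ 6 := Nat.pow_lt_pow_right (by omega) hk
  have := Nat.xor_lt_two_pow hm hp
  exact ⟨Int.natCast_nonneg _, by exact_mod_cast this⟩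

theorem assign_lookup (centers : List Int) (h : Int) (h0 : 0 ≤ h) (h64 : h < 64) :
    PySem.List.pyGetD (assignArr centers) h 0 = nearestCenter centers h := by
  unfold assignArr
  exact PySem.List.pyGetD_map_pyRange_of_nonneg _ 64 h 0 h0 h64

theorem main_eq (centers : List Int) (hpre : centers ≠ []) :
    delaunay_graph centers = delaunay_graph_alt centers := by
  unfold delaunay_graph delaunay_graph_alt
  apply PySem.List.foldl_congr_mem
  intro es c1 _
  rw [cells_char centers c1, List.foldl_filter]
  apply PySem.List.foldl_congr_mem
  intro es h hh
  obtain ⟨h0, h64⟩ := PySem.List.mem_pyRange_one.mp hh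
  rw [assign_lookup centers h h0 h64]
  simp only [beq_iff_eq]
  by_cases hg : nearestCenter centers h = c1
  · rw [if_pos hg, if_pos hg]
    unfold neighbors
    rw [List.foldl_map]
    apply PySem.List.foldl_congr_mem
    intro es i hi
    obtain ⟨i0, i6⟩ := PySem.List.mem_pyRange_one.mp hi
    obtain ⟨nb0, nb64⟩ := xor_bound h i h0 h64 i0 i6
    rw [assign_lookup centers _ nb0 nb64]
    have hcond :
        (centers.foldl (fun es c2 =>
            if c2 ≠ c1 ∧ PySem.Int.bxor h (pyShl1 i) ∈ (voronoi_cells centers).getD c2 [] then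
              PySem.Set.add es (min c1 c2, max c1 c2)
            else es) es)
        = centers.foldl (fun es c2 =>
            if c2 ≠ c1 ∧ nearestCenter centers (PySem.Int.bxor h (pyShl1 i)) = c2 then
              PySem.Set.add es (min c1 c2, max c1 c2)
            else es) es := by
      apply PySem.List.foldl_congr_mem
      intro es c2 _
      have hmem := mem_cells_iff centers c2 (PySem.Int.bxor h (pyShl1 i)) nb0 nb64
      by_cases hc : c2 ≠ c1 ∧ nearestCenter centers (PySem.Int.bxor h (pyShl1 i)) = c2
      · rw [if_pos ⟨hc.1, hmem.mpr hc.2⟩, if_pos hc]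
      · rw [if_neg (fun hcc => hc ⟨hcc.1, hmem.mp hcc.2⟩), if_neg hc]
    rw [hcond, collapse centers c1 _ es (nearestCenter_mem centers _ hpre)]
  · rw [if_neg hg, if_neg hg]

-- ===== VERDICT (by name: the statement is the Claim_ definition above) =====
theorem delaunay_graph_spec : Claim_equal_delaunay_graph := by
  intro centers _ hpre
  show delaunay_graph centers = delaunay_graph_alt centers
  exact main_eq centers hpre
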